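-- pv_equiv track=rewrite | github.com/doniyor-egamberdiyev-230300/PythonHomework | lesson-4/homework/homeworks3.py | insert_underscores
-- ===== SOURCE A (Python) =====
-- def insert_underscores(txt):
--     result = []
--     vowels = "aeiouAEIOU"
--     count = 0  # Harflarni hisoblash
--
--     for i in range(len(txt)):
--         result.append(txt[i])
--         count += 1
--
--         # Har 3 ta harfdan keyin underscore qo'yish
--         if count % 3 == 0 and txt[i] not in vowels:
--             if i + 1 < len(txt) and txt[i + 1] != '_':
--                 result.append('_')
--
--     return ''.join(result)
-- ===== SOURCE B (Python) =====
-- def insert_underscores(txt):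
--     vowels = set("aeiouAEIOU")
--     chunks = []
--     i = 0
--     while i < len(txt):
--         chunks.append(txt[i:i+3])
--         i += 3
--     parts = []
--     for cur, nxt in zip(chunks, chunks[1:]):
--         parts.append(cur)
--         if cur[2] not in vowels and nxt[0] != '_':
--             parts.append('_')
--     if chunks:
--         parts.append(chunks[-1])
--     return ''.join(parts)
-- ===== Notes on version B (the rewrite author's own statement) =====
-- stated objective: alternative
-- what changed: B splits the text into 3-character chunks once and emits each chunk followed by a conditional underscore (based on the chunk's last char and the next chunk's first char), instead of A's per-character loop with a running counter and index lookahead.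
import Mathlib
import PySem

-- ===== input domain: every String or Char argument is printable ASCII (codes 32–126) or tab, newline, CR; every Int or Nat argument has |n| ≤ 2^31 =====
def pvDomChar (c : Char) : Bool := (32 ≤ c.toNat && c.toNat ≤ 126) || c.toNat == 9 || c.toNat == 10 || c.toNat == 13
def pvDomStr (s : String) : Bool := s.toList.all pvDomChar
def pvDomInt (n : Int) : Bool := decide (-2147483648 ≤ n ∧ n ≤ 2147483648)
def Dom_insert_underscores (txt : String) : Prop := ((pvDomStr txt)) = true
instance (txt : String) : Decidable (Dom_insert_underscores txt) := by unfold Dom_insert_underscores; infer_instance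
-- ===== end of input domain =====

-- B replaces A's per-character loop (running counter + index lookahead) by a single split into
-- 3-character chunks, emitting each chunk followed by a conditional underscore; same O(n) cost.

-- ===== PORT A =====
def pvAVowels : List Char := "aeiouAEIOU".toList

-- the 'for i in range(len(txt))' loop of A, as structural recursion over the characters,
-- carrying the same state (result, count); txt[i+1] is the head of the remaining list
def pvALoop (cs : List Char) (count : Int) (result : List Char) : List Char :=
  match cs with
  | [] => result
  | c :: rest =>
    let result := result ++ [c]
    let count := count + 1
    let result :=
      if count % 3 = 0 ∧ c ∉ pvAVowels then
        match rest with
        | d :: _ => if d ≠ '_' then result ++ ['_'] else result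
        | [] => result
      else result
    pvALoop rest count result

def insert_underscores (txt : String) : String :=
  String.mk (pvALoop txt.toList 0 [])

-- ===== PORT B =====
-- B's while loop: while i < len(txt): chunks.append(txt[i:i+3]); i += 3
def pvBChunks (cs : List Char) (i : Int) : List (List Char) :=
  if h : i < (cs.length : Int) then
    PySem.List.slice cs (some i) (some (i + 3)) :: pvBChunks cs (i + 3)
  else []
termination_by ((cs.length : Int) - i).toNat
decreasing_by omega

def pvBParts (cs : List Char) : List Char :=
  let vowels : PySem.Set Char := PySem.Set.ofList "aeiouAEIOU".toList
  let chunks := pvBChunks cs 0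
  -- for cur, nxt in zip(chunks, chunks[1:]) ; cur[2]/nxt[0] are total here (pyGet? .getD ' ' is exact)
  let parts := (chunks.zip (PySem.List.slice chunks (some 1) none)).foldl
    (fun (parts : List Char) (cn : List Char × List Char) =>
      let parts := parts ++ cn.1
      if ((PySem.List.pyGet? cn.1 2).getD ' ') ∉ vowels ∧ ((PySem.List.pyGet? cn.2 0).getD ' ') ≠ '_'
      then parts ++ ['_'] else parts) ([] : List Char)
  if chunks ≠ [] then parts ++ ((PySem.List.pyGet? chunks (-1)).getD []) else parts

def insert_underscores_alt (txt : String) : String :=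
  String.mk (pvBParts txt.toList)

-- ===== PRECONDITION & SPEC =====
def Spec_insert_underscores (txt : String) (out : String) : Prop := out = insert_underscores_alt txt
instance (txt : String) (out : String) : Decidable (Spec_insert_underscores txt out) := by unfold Spec_insert_underscores; infer_instance

-- ===== CLAIM (what is proved, stated in full; the proofs are below) =====
def Claim_equal_insert_underscores : Prop := ∀ (txt : String), Dom_insert_underscores txt → Spec_insert_underscores txt (insert_underscores txt)

-- ===== LEMMAS AND PROOFS =====

lemma pvALoop_cons (c : Char) (rest : List Char) (count : Int) (acc : List Char) :
    pvALoop (c :: rest) count acc =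
      pvALoop rest (count + 1)
        (acc ++ [c] ++
          (if (count + 1) % 3 = 0 ∧ c ∉ pvAVowels ∧ (rest.head?.getD '_') ≠ '_'
           then ['_'] else [])) := by
  simp only [pvALoop]
  cases rest with
  | nil => simp
  | cons d t =>
    simp only [List.head?_cons, Option.getD_some]
    by_cases hc : (count + 1) % 3 = 0 ∧ c ∉ pvAVowels
    · simp only [if_pos hc]
      by_cases hd : d = '_' <;> simp [hd, hc.1, hc.2]
    · rw [if_neg hc, if_neg (by tauto)]; simp

lemma pvALoop_acc (cs : List Char) : ∀ (count : Int) (acc : List Char),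
    pvALoop cs count acc = acc ++ pvALoop cs count [] := by
  induction cs with
  | nil => intro count acc; simp [pvALoop]
  | cons c rest ih =>
    intro count acc
    rw [pvALoop_cons, pvALoop_cons, ih, ih (count + 1)
      ([] ++ [c] ++ _)]
    simp

lemma pvALoop_shift (cs : List Char) : ∀ (count : Int) (acc : List Char),
    pvALoop cs (count + 3) acc = pvALoop cs count acc := by
  induction cs with
  | nil => intro count acc; simp [pvALoop]
  | cons c rest ih =>
    intro count acc
    rw [pvALoop_cons, pvALoop_cons]
    have hmod : (count + 3 + 1) % 3 = (count + 1) % 3 := by omega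
    rw [hmod, show count + 3 + 1 = (count + 1) + 3 from by ring, ih]

-- the underscore A may insert after a full chunk ending in c3, given the remaining text
def pvU (c3 : Char) (rest : List Char) : List Char :=
  if c3 ∉ pvAVowels ∧ (rest.head?.getD '_') ≠ '_' then ['_'] else []

lemma pvALoop_step3 (c1 c2 c3 : Char) (rest : List Char) :
    pvALoop (c1 :: c2 :: c3 :: rest) 0 [] =
      [c1, c2, c3] ++ pvU c3 rest ++ pvALoop rest 0 [] := by
  rw [pvALoop_cons, pvALoop_cons, pvALoop_cons]
  norm_num
  have h3 : pvALoop rest 3 = pvALoop rest (0 + 3) := by norm_num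
  rw [h3, pvALoop_shift, pvALoop_acc]
  simp [pvU]

-- proof-only view of B's chunking: structural recursion by take/drop
def pvChunkRec (s : List Char) : List (List Char) :=
  if h : s = [] then []
  else s.take 3 :: pvChunkRec (s.drop 3)
termination_by s.length
decreasing_by
  have hlen : s.length ≠ 0 := fun h0 => h (List.length_eq_zero_iff.mp h0)
  simp only [List.length_drop]
  omega

lemma pvChunkRec_nil : pvChunkRec [] = [] := by rw [pvChunkRec]; simp

lemma pvChunkRec_cons (c : Char) (rest : List Char) :
    pvChunkRec (c :: rest) = (c :: rest).take 3 :: pvChunkRec ((c :: rest).drop 3) := by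
  rw [pvChunkRec]; simp

lemma pvBChunks_eq (cs : List Char) : ∀ (k n : Nat), cs.length - n ≤ k →
    pvBChunks cs (n : Int) = pvChunkRec (cs.drop n) := by
  intro k
  induction k with
  | zero =>
    intro n h
    rw [pvBChunks, dif_neg (by omega)]
    rw [List.drop_of_length_le (by omega), pvChunkRec_nil]
  | succ k ih =>
    intro n h
    by_cases hn : n < cs.length
    · rw [pvBChunks, dif_pos (by exact_mod_cast hn)]
      rw [show ((n : Int) + 3) = ((n : Int) + ((3 : Nat) : Int)) from by norm_num]
      rw [PySem.List.slice_natCast_add cs n 3]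
      rw [show ((n : Int) + ((3 : Nat) : Int)) = ((n + 3 : Nat) : Int) from by push_cast; ring]
      rw [ih (n + 3) (by omega)]
      have hne : cs.drop n ≠ [] := by
        intro h0
        have := List.length_drop (l := cs) (i := n)
        rw [h0] at this
        simp at this
        omega
      conv_rhs => rw [pvChunkRec]
      rw [dif_neg hne, List.drop_drop]
    · rw [pvBChunks, dif_neg (by exact_mod_cast hn)]
      rw [List.drop_of_length_le (by omega), pvChunkRec_nil]

lemma pvBChunks_zero (cs : List Char) : pvBChunks cs 0 = pvChunkRec cs := by
  have := pvBChunks_eq cs cs.length 0 (by omega)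
  simpa using this

-- the fold body of B's for-loop, as a flatMap
def pvG (cn : List Char × List Char) : List Char :=
  cn.1 ++ (if ((PySem.List.pyGet? cn.1 2).getD ' ') ∉ PySem.Set.ofList "aeiouAEIOU".toList
              ∧ ((PySem.List.pyGet? cn.2 0).getD ' ') ≠ '_' then ['_'] else [])

lemma pvBFold_eq (l : List (List Char × List Char)) : ∀ (acc : List Char),
    l.foldl (fun (parts : List Char) (cn : List Char × List Char) =>
      let parts := parts ++ cn.1
      if ((PySem.List.pyGet? cn.1 2).getD ' ') ∉ PySem.Set.ofList "aeiouAEIOU".toList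
          ∧ ((PySem.List.pyGet? cn.2 0).getD ' ') ≠ '_'
      then parts ++ ['_'] else parts) acc = acc ++ l.flatMap pvG := by
  induction l with
  | nil => intro acc; simp
  | cons x t ih =>
    intro acc
    simp only [List.foldl_cons, List.flatMap_cons, ih, pvG]
    split_ifs <;> simp

lemma pvVowels_mem (c : Char) :
    c ∈ (PySem.Set.ofList "aeiouAEIOU".toList : PySem.Set Char) ↔ c ∈ pvAVowels := by
  rw [PySem.Set.mem_ofList]; rfl

lemma pvB_step3 (c1 c2 c3 : Char) (rest : List Char) :
    pvBParts (c1 :: c2 :: c3 :: rest) = [c1, c2, c3] ++ pvU c3 rest ++ pvBParts rest := by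
  simp only [pvBParts, pvBChunks_zero]
  rw [pvChunkRec_cons]
  simp only [List.take_succ_cons, List.take_zero, List.drop_succ_cons, List.drop_zero]
  cases rest with
  | nil =>
    simp [pvChunkRec_nil, pvU, PySem.List.slice_from_one, PySem.List.pyGet?_neg_one]
  | cons d t =>
    rw [pvChunkRec_cons]
    rw [PySem.List.slice_from_one, PySem.List.slice_from_one]
    simp only [List.tail_cons, List.zip_cons_cons, pvBFold_eq, List.flatMap_cons,
      List.nil_append, PySem.List.pyGet?_neg_one]
    have hne : ((d :: t).take 3 :: pvChunkRec ((d :: t).drop 3)) ≠ [] := by simp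
    rw [if_pos (by simp), if_pos hne]
    have hlast : ([c1, c2, c3] :: (d :: t).take 3 :: pvChunkRec ((d :: t).drop 3)).getLast? =
        ((d :: t).take 3 :: pvChunkRec ((d :: t).drop 3)).getLast? := List.getLast?_cons_cons ..
    rw [hlast]
    have hg : pvG ([c1, c2, c3], (d :: t).take 3) = [c1, c2, c3] ++ pvU c3 (d :: t) := by
      simp only [pvG, pvU]
      have h2 : (PySem.List.pyGet? [c1, c2, c3] 2).getD ' ' = c3 := by
        simp [PySem.List.pyGet?, PySem.List.pyIdx?]
      have h0 : (PySem.List.pyGet? ((d :: t).take 3) 0).getD ' ' = d := by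
        have ht : (d :: t).take 3 = d :: t.take 2 := rfl
        rw [ht, PySem.List.pyGet?_zero_cons]; rfl
      rw [h2, h0]
      by_cases hv : c3 ∈ pvAVowels
      · rw [if_neg (by rw [pvVowels_mem]; tauto), if_neg (by tauto)]
      · by_cases hd : d ≠ '_'
        · rw [if_pos ⟨by rw [pvVowels_mem]; exact hv, hd⟩, if_pos ⟨hv, hd⟩]
        · rw [if_neg (by tauto), if_neg (by tauto)]
    rw [hg]
    simp

lemma pvMain : ∀ (n : Nat) (cs : List Char), cs.length ≤ n → pvALoop cs 0 [] = pvBParts cs := by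
  intro n
  induction n with
  | zero =>
    intro cs h
    have : cs = [] := by
      cases cs with
      | nil => rfl
      | cons c t => simp at h
    subst this
    simp [pvALoop, pvBParts, pvBChunks_zero, pvChunkRec_nil]
  | succ n ih =>
    intro cs h
    match cs with
    | [] => simp [pvALoop, pvBParts, pvBChunks_zero, pvChunkRec_nil]
    | [c] =>
      simp [pvALoop, pvBParts, pvBChunks_zero, pvChunkRec_cons, pvChunkRec_nil,
        PySem.List.slice_from_one, PySem.List.pyGet?_neg_one]
    | [c, d] =>
      simp [pvALoop, pvBParts, pvBChunks_zero, pvChunkRec_cons, pvChunkRec_nil,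
        PySem.List.slice_from_one, PySem.List.pyGet?_neg_one]
    | c1 :: c2 :: c3 :: rest =>
      rw [pvALoop_step3, pvB_step3]
      have hr : rest.length ≤ n := by simp at h; omega
      rw [ih rest hr]

-- ===== VERDICT (by name: the statement is the Claim_ definition above) =====
theorem insert_underscores_spec : Claim_equal_insert_underscores := by
  intro txt _
  unfold Spec_insert_underscores insert_underscores insert_underscores_alt
  rw [pvMain txt.toList.length txt.toList (le_refl _)]
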